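-- pv_equiv track=rewrite | github.com/EricaMotloutsi/v0.python1 | decomposition/a_decomposition/double_vowel.py | double_vowel
-- ===== SOURCE A (Python) =====
-- def double_vowel(str):
--     ans_str = ""
--     for ch in str:
--         if ch in "aeiou":
--             ans_str = ans_str + ch + ch
--         else:
--             ans_str += ch
--     return ans_str
-- ===== SOURCE B (Python) =====
-- _TABLE = {ord(v): v * 2 for v in "aeiou"}
--
-- def double_vowel(str):
--     return str.translate(_TABLE)
-- ===== Notes on version B (the rewrite author's own statement) =====
-- stated objective: faster
-- what changed: Replaces the explicit scan-and-branch loop with quadratic string concatenation by a precomputed ordinal->doubled-string translation table applied in one str.translate call.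
import Mathlib
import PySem

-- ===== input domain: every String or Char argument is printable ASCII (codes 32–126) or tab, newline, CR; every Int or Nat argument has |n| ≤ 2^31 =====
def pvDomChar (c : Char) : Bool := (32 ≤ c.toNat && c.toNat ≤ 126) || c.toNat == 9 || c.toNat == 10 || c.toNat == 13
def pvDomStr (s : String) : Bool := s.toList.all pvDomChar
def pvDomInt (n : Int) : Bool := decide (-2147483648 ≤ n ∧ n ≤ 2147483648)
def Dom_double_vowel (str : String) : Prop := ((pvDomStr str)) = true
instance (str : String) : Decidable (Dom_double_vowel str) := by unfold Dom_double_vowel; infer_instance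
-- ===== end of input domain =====

-- B replaces A's scan-and-branch concatenation loop by a precomputed vowel->doubled translation table applied in one library pass (idiomatic).

-- the characters of "aeiou" (written as a char list: exact on this ASCII literal)
def pvVowels : List Char := ['a', 'e', 'i', 'o', 'u']

-- ===== PORT A =====
-- literal port: accumulate ans_str left to right, branching on `ch in "aeiou"`
def double_vowel (str : String) : String :=
  String.ofList <|
    str.toList.foldl
      (fun ans_str ch =>
        if pvVowels.contains ch then ans_str ++ [ch, ch] else ans_str ++ [ch])
      []

-- ===== PORT B =====
-- the translation table: vowel ↦ its doubled form (Source B's {ord(v): v*2 for v in "aeiou"})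
def pvTable_double_vowel : PySem.Dict Char (List Char) :=
  pvVowels.foldl (fun d v => d.insert v [v, v]) PySem.Dict.empty

-- str.translate: each char replaced by its table entry, unmapped chars pass through
def double_vowel_alt (str : String) : String :=
  String.ofList (str.toList.flatMap (fun c => (pvTable_double_vowel.get? c).getD [c]))

-- ===== PRECONDITION & SPEC =====
def Spec_double_vowel (str : String) (out : String) : Prop := out = double_vowel_alt str
instance (str : String) (out : String) : Decidable (Spec_double_vowel str out) := by unfold Spec_double_vowel; infer_instance

-- ===== CLAIM (what is proved, stated in full; the proofs are below) =====
def Claim_equal_double_vowel : Prop := ∀ (str : String), Dom_double_vowel str → Spec_double_vowel str (double_vowel str)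

-- ===== LEMMAS AND PROOFS =====
-- per-character agreement: A's branch and B's table lookup produce the same chunk
lemma chunk_eq (ch : Char) :
    (if pvVowels.contains ch then [ch, ch] else [ch])
      = (pvTable_double_vowel.get? ch).getD [ch] := by
  by_cases h : pvVowels.contains ch
  · simp only [pvVowels, List.contains_eq_mem, decide_eq_true_eq] at h
    fin_cases h <;> rfl
  · rw [if_neg h]
    simp only [pvVowels, List.contains_eq_mem, decide_eq_true_eq, List.mem_cons,
      List.not_mem_nil, or_false, not_or] at h
    obtain ⟨ha, he, hi, ho, hu⟩ := h
    have hT : pvTable_double_vowel =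
        PySem.Dict.mk [('a', ['a','a']), ('e', ['e','e']), ('i', ['i','i']),
                       ('o', ['o','o']), ('u', ['u','u'])] := by rfl
    rw [hT]
    have ba : ('a' == ch) = false := beq_eq_false_iff_ne.mpr (Ne.symm ha)
    have be : ('e' == ch) = false := beq_eq_false_iff_ne.mpr (Ne.symm he)
    have bi : ('i' == ch) = false := beq_eq_false_iff_ne.mpr (Ne.symm hi)
    have bo : ('o' == ch) = false := beq_eq_false_iff_ne.mpr (Ne.symm ho)
    have bu : ('u' == ch) = false := beq_eq_false_iff_ne.mpr (Ne.symm hu)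
    simp [PySem.Dict.get?, List.find?, ba, be, bi, bo, bu]

-- loop invariant: A's fold from accumulator acc is acc ++ the flatMap of chunks
lemma fold_eq (l : List Char) (acc : List Char) :
    l.foldl
      (fun ans_str ch =>
        if pvVowels.contains ch then ans_str ++ [ch, ch] else ans_str ++ [ch])
      acc
      = acc ++ l.flatMap (fun c => (pvTable_double_vowel.get? c).getD [c]) := by
  induction l generalizing acc with
  | nil => simp
  | cons ch t ih =>
    simp only [List.foldl, List.flatMap_cons]
    rw [ih, ← chunk_eq ch]
    split_ifs <;> simp

-- ===== VERDICT (by name: the statement is the Claim_ definition above) =====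
theorem double_vowel_spec : Claim_equal_double_vowel := by
  intro str _
  unfold Spec_double_vowel double_vowel double_vowel_alt
  rw [fold_eq]
  simp
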